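-- pv_equiv track=rewrite | github.com/pavlotkk/pyalgorithms | pyalgorithms/interview/bin_str_template.py | solve
-- ===== SOURCE A (Python) =====
-- from typing import Generator
--
-- def solve(template: str) -> Generator:
--     count = 0
--     for x in template:
--         if x == "?":
--             count += 1
--
--     for i in range(count ** 2):
--         ss = template
--         bin_format = "{:0>" + str(count) + "b}"
--         for x in bin_format.format(i):
--             ss = ss.replace("?", x, 1)
--         yield ss
-- ===== SOURCE B (Python) =====
-- from typing import Generator
--
-- def solve(template: str) -> Generator:
--     parts = template.split("?")
--     count = len(parts) - 1
--     fmt = "{:0>" + str(count) + "b}"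
--     for i in range(count ** 2):
--         bits = fmt.format(i)
--         yield "".join(p + b for p, b in zip(parts[:-1], bits)) + parts[-1]
-- ===== Notes on version B (the rewrite author's own statement) =====
-- stated objective: simpler
-- what changed: B splits the template on the question-mark placeholder once and, per number, interleaves the fixed pieces with the formatted binary digits via zip/join, instead of A's repeated one-occurrence str.replace scans of the whole string per digit.
import Mathlib
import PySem

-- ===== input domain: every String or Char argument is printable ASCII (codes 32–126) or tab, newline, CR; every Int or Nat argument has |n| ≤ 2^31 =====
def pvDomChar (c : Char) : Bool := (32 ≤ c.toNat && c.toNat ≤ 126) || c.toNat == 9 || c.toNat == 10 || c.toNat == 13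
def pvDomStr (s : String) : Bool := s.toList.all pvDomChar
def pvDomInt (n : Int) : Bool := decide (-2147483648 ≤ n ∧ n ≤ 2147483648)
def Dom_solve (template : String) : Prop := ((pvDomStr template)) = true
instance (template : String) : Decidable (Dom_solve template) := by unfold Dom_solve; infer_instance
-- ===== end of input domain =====

-- B replaces A's per-character str.replace("?", x, 1) rescans by splitting the template on "?"
-- once and interleaving the pieces with the binary digits (objective: simpler).
-- Both programs are generators; the port returns the list of yielded strings.

-- shared helper: '{:0>Nb}'.format(i) for i ≥ 0, ported by hand (exact for nonnegative i):
-- binary digits of n, most significant first ('' for 0)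
def binDigits : Nat → List Char
  | 0 => []
  | (n+1) => binDigits ((n+1) / 2) ++ [if (n+1) % 2 = 1 then '1' else '0']

-- bin(n) without the '0b' prefix, then padded on the left with '0' to width c
def fmtBin (c : Nat) (n : Nat) : List Char :=
  let ds := if n = 0 then ['0'] else binDigits n
  List.replicate (c - ds.length) '0' ++ ds

-- ===== PORT A =====
-- ss.replace("?", x, 1) on a string: replace the first '?' (if any) by x — ported by hand, exact
def replaceQ1 : List Char → Char → List Char
  | [], _ => []
  | c :: cs, x => if c = '?' then x :: cs else c :: replaceQ1 cs x

def solve (template : String) : List String :=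
  -- count = number of '?' in template (the first for-loop)
  let count : Int := template.toList.foldl (fun acc x => if x = '?' then acc + 1 else acc) 0
  -- for i in range(count ** 2): fold the format string through ss.replace("?", x, 1)
  (PySem.List.pyRange 0 (count ^ 2) 1).map (fun i =>
    String.ofList ((fmtBin count.toNat i.toNat).foldl (fun ss x => replaceQ1 ss x) template.toList))

-- ===== PORT B =====
-- template.split("?"), ported by hand (exact for the one-character separator "?")
def splitQ : List Char → List (List Char)
  | [] => [[]]
  | c :: cs =>
    if c = '?' then [] :: splitQ cs
    else
      match splitQ cs with
      | [] => [[c]]            -- unreachable: splitQ never returns []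
      | p :: ps => (c :: p) :: ps

def solve_alt (template : String) : List String :=
  let parts := splitQ template.toList
  let count : Int := (parts.length : Int) - 1
  (PySem.List.pyRange 0 (count ^ 2) 1).map (fun i =>
    let bits := fmtBin count.toNat i.toNat
    -- "".join(p + b for p, b in zip(parts[:-1], bits)) + parts[-1]
    String.ofList (((parts.dropLast.zip bits).flatMap (fun pb => pb.1 ++ [pb.2])) ++ parts.getLastD []))

-- ===== PRECONDITION & SPEC =====
def Spec_solve (template : String) (out : List String) : Prop := out = solve_alt template
instance (template : String) (out : List String) : Decidable (Spec_solve template out) := by unfold Spec_solve; infer_instance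

-- ===== CLAIM (what is proved, stated in full; the proofs are below) =====
def Claim_equal_solve : Prop := ∀ (template : String), Dom_solve template → Spec_solve template (solve template)

-- ===== LEMMAS AND PROOFS =====

-- number of '?' in a list of characters
def countQ (l : List Char) : Nat := l.countP (· = '?')

-- reference semantics shared by both ports: fill the '?' slots of s, left to right, with bits
def fill : List Char → List Char → List Char
  | s, [] => s
  | [], _ :: _ => []
  | c :: cs, b :: bs => if c = '?' then b :: fill cs bs else c :: fill cs (b :: bs)

-- B's per-item body, as a function of the split parts
def interleave (parts : List (List Char)) (bits : List Char) : List Char :=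
  ((parts.dropLast.zip bits).flatMap (fun pb => pb.1 ++ [pb.2])) ++ parts.getLastD []

theorem countQ_nil : countQ [] = 0 := rfl
theorem countQ_cons (c : Char) (cs : List Char) :
    countQ (c :: cs) = (if c = '?' then 1 else 0) + countQ cs := by
  simp only [countQ, List.countP_cons]
  by_cases hc : c = '?' <;> simp [hc]
  omega

theorem foldl_count_eq (l : List Char) (n : Int) :
    l.foldl (fun acc x => if x = '?' then acc + 1 else acc) n = n + (countQ l : Int) := by
  induction l generalizing n with
  | nil => simp [countQ_nil]
  | cons c cs ih =>
    simp only [List.foldl_cons, countQ_cons, ih]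
    split <;> push_cast <;> omega

theorem splitQ_ne_nil (l : List Char) : splitQ l ≠ [] := by
  cases l with
  | nil => simp [splitQ]
  | cons c cs =>
    simp only [splitQ]
    split
    · simp
    · cases h : splitQ cs <;> simp

theorem splitQ_length (l : List Char) : (splitQ l).length = countQ l + 1 := by
  induction l with
  | nil => simp [splitQ, countQ_nil]
  | cons c cs ih =>
    simp only [splitQ, countQ_cons]
    split
    · simp [ih]; omega
    · cases h : splitQ cs with
      | nil => exact absurd h (splitQ_ne_nil cs)
      | cons p ps => simp [h] at ih ⊢; omega

-- fill is the identity past the bits: a non-'?' head passes through for any bits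
theorem fill_cons_ne (c : Char) (cs bits : List Char) (hc : c ≠ '?') :
    fill (c :: cs) bits = c :: fill cs bits := by
  cases bits with
  | nil => simp [fill]
  | cons b bs => simp [fill, hc]

-- A's single replace pushed into fill
theorem fill_replaceQ1 (s : List Char) (b : Char) (bs : List Char) (hb : b ≠ '?') :
    fill (replaceQ1 s b) bs = fill s (b :: bs) := by
  induction s generalizing bs with
  | nil => cases bs <;> simp [replaceQ1, fill]
  | cons c cs ih =>
    by_cases hc : c = '?'
    · subst hc
      cases bs with
      | nil => simp [replaceQ1, fill]
      | cons b' bs' => simp [replaceQ1, fill, hb]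
    · simp only [replaceQ1, if_neg hc]
      rw [fill_cons_ne c _ _ hc, fill_cons_ne c _ _ hc, ih]

-- A's loop over the bits equals fill
theorem foldl_replaceQ1_eq_fill (bits : List Char) (s : List Char)
    (hb : ∀ b ∈ bits, b ≠ '?') :
    bits.foldl (fun ss x => replaceQ1 ss x) s = fill s bits := by
  induction bits generalizing s with
  | nil => simp [fill]
  | cons b bs ih =>
    simp only [List.foldl_cons]
    rw [ih (replaceQ1 s b) (fun x hx => hb x (List.mem_cons_of_mem _ hx)),
        fill_replaceQ1 s b bs (hb b (List.mem_cons_self ..))]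

theorem interleave_cons_ne (c : Char) (cs bits : List Char) (hc : c ≠ '?')
    (hlen : countQ cs ≤ bits.length) :
    interleave (splitQ (c :: cs)) bits = c :: interleave (splitQ cs) bits := by
  simp only [splitQ, if_neg hc]
  cases h : splitQ cs with
  | nil => exact absurd h (splitQ_ne_nil cs)
  | cons p ps =>
    cases ps with
    | nil => simp [interleave, List.getLastD]
    | cons q qs =>
      cases bits with
      | nil =>
        -- impossible: splitQ cs has ≥ 2 pieces, so cs contains a '?', but bits is empty
        have := splitQ_length cs
        rw [h] at this
        simp at this hlen
        omega
      | cons b bs => simp [interleave, List.getLastD, List.dropLast]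

theorem interleave_cons_q (cs : List Char) (b : Char) (bs : List Char) :
    interleave (splitQ ('?' :: cs)) (b :: bs) = b :: interleave (splitQ cs) bs := by
  have h := splitQ_ne_nil cs
  simp only [splitQ, reduceIte]
  cases hsp : splitQ cs with
  | nil => exact absurd hsp h
  | cons p ps => simp [interleave]

-- B's per-item body equals fill whenever there are enough bits (the format always pads to count)
theorem interleave_eq_fill (s bits : List Char) (h : countQ s ≤ bits.length) :
    interleave (splitQ s) bits = fill s bits := by
  induction s generalizing bits with
  | nil => cases bits <;> simp [splitQ, interleave, fill]
  | cons c cs ih =>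
    by_cases hc : c = '?'
    · subst hc
      cases bits with
      | nil => simp [countQ_cons] at h
      | cons b bs =>
        rw [interleave_cons_q, fill]
        simp only [reduceIte]
        rw [ih bs (by simp [countQ_cons] at h; omega)]
    · have hlen : countQ cs ≤ bits.length := by simp [countQ_cons, hc] at h; omega
      rw [interleave_cons_ne c cs bits hc hlen, fill_cons_ne c cs bits hc,
          ih bits (by simp [countQ_cons, hc] at h ⊢; omega)]

-- the format string contains only '0' and '1'
theorem binDigits_no_q (n : Nat) : ∀ b ∈ binDigits n, b ≠ '?' := by
  induction n using Nat.strong_induction_on with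
  | _ n ih =>
    cases n with
    | zero => simp [binDigits]
    | succ m =>
      intro b hb
      simp only [binDigits, List.mem_append, List.mem_singleton] at hb
      rcases hb with hb | hb
      · exact ih ((m + 1) / 2) (Nat.div_lt_self (Nat.succ_pos m) one_lt_two) b hb
      · subst hb; split <;> decide

theorem fmtBin_no_q (c n : Nat) : ∀ b ∈ fmtBin c n, b ≠ '?' := by
  intro b hb
  simp only [fmtBin, List.mem_append, List.mem_replicate] at hb
  rcases hb with ⟨-, hb⟩ | hb
  · subst hb; decide
  · split at hb
    · simp at hb; subst hb; decide
    · exact binDigits_no_q n b hb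

theorem fmtBin_length (c n : Nat) : c ≤ (fmtBin c n).length := by
  simp only [fmtBin, List.length_append, List.length_replicate]
  omega

-- ===== VERDICT (by name: the statement is the Claim_ definition above) =====
theorem solve_spec : Claim_equal_solve := by
  intro template _
  unfold Spec_solve solve solve_alt
  have hc : ((splitQ template.toList).length : Int) - 1 = (countQ template.toList : Int) := by
    rw [splitQ_length]; push_cast; ring
  simp only [foldl_count_eq, zero_add, hc]
  apply List.map_congr_left
  intro i _
  have hcn : ((countQ template.toList : Int)).toNat = countQ template.toList := Int.toNat_natCast _
  rw [hcn]
  congr 1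
  rw [foldl_replaceQ1_eq_fill _ _ (fmtBin_no_q _ _)]
  exact (interleave_eq_fill _ _ (fmtBin_length _ _)).symm
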